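-- pv_equiv track=rewrite | github.com/azevedosvg/BSI | estruturas-de-dados/funcao_recursividade.py | contar_zeros
-- ===== SOURCE A (Python) =====
-- def contar_zeros(n):
--     if n < 10:
--         return 1 if n == 0 else 0
--
--     ultimo = n % 10
--
--     if ultimo == 0:
--         return 1 + contar_zeros(n // 10)
--     else:
--         return contar_zeros(n // 10)
-- ===== SOURCE B (Python) =====
-- def contar_zeros(n):
--     if n < 10:
--         return 1 if n == 0 else 0
--     count = 0
--     while n >= 10:
--         if n % 10 == 0:
--             count += 1
--         n //= 10
--     return count
-- ===== Notes on version B (the rewrite author's own statement) =====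
-- stated objective: alternative
-- what changed: Replaces the recursive digit-peeling with an iterative while loop over the same arithmetic, accumulating the zero count in a local counter.
import Mathlib
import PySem

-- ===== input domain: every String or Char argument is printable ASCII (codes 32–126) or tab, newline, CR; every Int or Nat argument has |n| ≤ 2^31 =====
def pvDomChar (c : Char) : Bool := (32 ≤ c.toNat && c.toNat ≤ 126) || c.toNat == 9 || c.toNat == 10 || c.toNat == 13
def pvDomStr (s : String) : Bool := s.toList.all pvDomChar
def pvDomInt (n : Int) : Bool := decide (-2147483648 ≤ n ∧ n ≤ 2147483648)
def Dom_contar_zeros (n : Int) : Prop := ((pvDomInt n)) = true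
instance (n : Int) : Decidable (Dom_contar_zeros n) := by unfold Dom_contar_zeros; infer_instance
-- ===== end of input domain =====

-- B replaces A's recursion by an iterative accumulator loop over the same digit arithmetic (objective: alternative decomposition).

-- termination measure lemma, cited by both ports' decreasing_by
theorem pv_fdiv_lt (n : Int) (h : ¬ n < 10) : (PySem.Int.floordiv n 10).toNat < n.toNat := by
  rw [PySem.Int.floordiv_eq_ediv_of_pos (by omega)]
  omega

-- ===== PORT A =====
def contar_zeros (n : Int) : Int :=
  if n < 10 then
    if n = 0 then 1 else 0
  else
    let ultimo := PySem.Int.mod n 10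
    if ultimo = 0 then 1 + contar_zeros (PySem.Int.floordiv n 10)
    else contar_zeros (PySem.Int.floordiv n 10)
termination_by n.toNat
decreasing_by all_goals exact pv_fdiv_lt n (by assumption)

-- ===== PORT B =====
-- the while loop of Source B, with `count` as the accumulator
def contarZerosLoop (n count : Int) : Int :=
  if h : n < 10 then count
  else
    contarZerosLoop (PySem.Int.floordiv n 10)
      (if PySem.Int.mod n 10 = 0 then count + 1 else count)
termination_by n.toNat
decreasing_by exact pv_fdiv_lt n h

def contar_zeros_alt (n : Int) : Int :=
  if n < 10 then
    if n = 0 then 1 else 0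
  else
    contarZerosLoop n 0

-- ===== PRECONDITION & SPEC =====
def Spec_contar_zeros (n : Int) (out : Int) : Prop := out = contar_zeros_alt n
instance (n : Int) (out : Int) : Decidable (Spec_contar_zeros n out) := by unfold Spec_contar_zeros; infer_instance

-- ===== CLAIM (what is proved, stated in full; the proofs are below) =====
def Claim_equal_contar_zeros : Prop := ∀ (n : Int), Dom_contar_zeros n → Spec_contar_zeros n (contar_zeros n)

-- ===== LEMMAS AND PROOFS =====

-- loop invariant: for n ≥ 1, the loop computes count + contar_zeros n
theorem loop_inv (k : Nat) : ∀ (n count : Int), n.toNat = k → 1 ≤ n →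
    contarZerosLoop n count = count + contar_zeros n := by
  induction k using Nat.strong_induction_on with
  | _ k ih =>
    intro n count hk h1
    unfold contarZerosLoop contar_zeros
    by_cases h : n < 10
    · simp [h]
      have : ¬ n = 0 := by omega
      simp [this]
    · have hdiv : 1 ≤ PySem.Int.floordiv n 10 := by
        rw [PySem.Int.floordiv_eq_ediv_of_pos (by omega)]; omega
      have hlt := pv_fdiv_lt n h
      simp only [h, dif_neg, if_neg, not_false_iff]
      rw [ih _ (hk ▸ hlt) _ _ rfl hdiv]
      split_ifs <;> ring

theorem contar_zeros_spec : Claim_equal_contar_zeros := by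
  intro n _
  unfold Spec_contar_zeros contar_zeros_alt
  by_cases h : n < 10
  · unfold contar_zeros
    simp [h]
  · rw [loop_inv n.toNat n 0 rfl (by omega)]
    simp [h]
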